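-- pv_equiv track=rewrite | github.com/piipecek/piipovo_stranky | catan/board.py | _printing_pattern
-- ===== SOURCE A (Python) =====
-- from typing import List
--
-- def _printing_pattern(list_to_print: List[str]):
--     unit = max([len(x) for x in list_to_print]) #kolik znaku ma nejdelsi vec co se bude tisknout
--     result = []
--
--     #leading spaces
--     result.append((" "*(unit))*2)
--     result.append(" "*(unit))
--     result.append("")
--     result.append(" "*(unit))
--     result.append((" "*(unit))*2)
--
--
--
--     for i, info in enumerate(list_to_print):
--         novy_kousek = info.ljust(unit, " ") + "".ljust(unit, " ")
--         if i < 3: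
--             result[0] += novy_kousek
--             continue
--         elif i < 7:
--             result[1] += novy_kousek
--             continue
--         elif i < 12:
--             result[2] += novy_kousek
--             continue
--         elif i < 16:
--             result[3] += novy_kousek
--             continue
--         else:
--             result[4] += novy_kousek
--             continue
--
--
--     return "\n".join(result)
-- ===== SOURCE B (Python) =====
-- def _printing_pattern(list_to_print):
--     unit = max(len(x) for x in list_to_print)
--
--     def build(items, counts, r):
--         if not counts:
--             return []
--         head, tail = items[:counts[0]], items[counts[0]:]
--         row = ' ' * (abs(r - 2) * unit) + ''.join(s.ljust(2 * unit) for s in head)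
--         return [row] + build(tail, counts[1:], r + 1)
--
--     return '\n'.join(build(list_to_print, [3, 4, 5, 4, len(list_to_print)], 0))
-- ===== Notes on version B (the rewrite author's own statement) =====
-- stated objective: faster
-- what changed: B recursively consumes the list in chunks of sizes [3,4,5,4,rest], pads each item once to a 2*unit-wide cell and builds each row with a single join (indent from the formula |row-2|*unit), instead of A's single enumerate loop that classifies every index and grows the rows of a mutable 5-row list by repeated string concatenation.
import Mathlib
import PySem

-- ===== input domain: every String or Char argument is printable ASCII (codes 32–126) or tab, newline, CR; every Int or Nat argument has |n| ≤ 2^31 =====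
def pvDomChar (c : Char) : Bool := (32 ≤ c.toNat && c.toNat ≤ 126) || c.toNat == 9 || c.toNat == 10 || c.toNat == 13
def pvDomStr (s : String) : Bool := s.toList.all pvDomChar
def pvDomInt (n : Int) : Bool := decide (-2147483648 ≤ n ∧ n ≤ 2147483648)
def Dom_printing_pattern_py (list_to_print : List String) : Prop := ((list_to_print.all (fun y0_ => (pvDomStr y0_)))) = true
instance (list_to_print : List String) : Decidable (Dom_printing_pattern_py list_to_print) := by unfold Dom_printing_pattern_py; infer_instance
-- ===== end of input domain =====

-- B builds the five rows by recursively consuming the list in chunks of given sizes,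
-- padding each item once to a 2*unit cell and computing each row's indent as |row-2|*unit,
-- instead of A's single loop dispatching every item into a mutable 5-row list by index.

-- str.ljust(w, " "): exact port (no pad when w ≤ len(s))
def pvLjust (cs : List Char) (w : Int) : List Char :=
  cs ++ List.replicate (w - (cs.length : Int)).toNat ' '

-- ===== PORT A =====
-- the body of A's for-loop (dispatch of one enumerated item into the 5 rows)
def pvStepA (unit : Int)
    (r : List Char × List Char × List Char × List Char × List Char)
    (p : Int × String) : List Char × List Char × List Char × List Char × List Char :=
  let novy := pvLjust p.2.toList unit ++ pvLjust [] unit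
  if p.1 < 3 then (r.1 ++ novy, r.2.1, r.2.2.1, r.2.2.2.1, r.2.2.2.2)
  else if p.1 < 7 then (r.1, r.2.1 ++ novy, r.2.2.1, r.2.2.2.1, r.2.2.2.2)
  else if p.1 < 12 then (r.1, r.2.1, r.2.2.1 ++ novy, r.2.2.2.1, r.2.2.2.2)
  else if p.1 < 16 then (r.1, r.2.1, r.2.2.1, r.2.2.2.1 ++ novy, r.2.2.2.2)
  else (r.1, r.2.1, r.2.2.1, r.2.2.2.1, r.2.2.2.2 ++ novy)

def printing_pattern_py (list_to_print : List String) : String :=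
  match PySem.List.max? (list_to_print.map (fun x => PySem.Str.len x)) (fun y => y) with
  | none => ""   -- max([]) raises ValueError in Python; excluded by Pre_
  | some unit =>
    let sp := PySem.List.pyRepeat [' '] unit          -- " "*(unit)
    let r := (PySem.List.enumerate list_to_print).foldl (pvStepA unit)
      (PySem.List.pyRepeat sp 2, sp, ([] : List Char), sp, PySem.List.pyRepeat sp 2)
    String.ofList (PySem.Chars.join ['\n'] [r.1, r.2.1, r.2.2.1, r.2.2.2.1, r.2.2.2.2])

-- ===== PORT B =====
-- one cell: s.ljust(2*unit)
def pvCell (u : Int) (s : String) : List Char := pvLjust s.toList (2*u)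

-- the recursive helper 'build(items, counts, r)' of Source B
def pvBuild (u : Int) : List String → List Int → Int → List (List Char)
  | _, [], _ => []
  | items, c :: cs, r =>
      (PySem.List.pyRepeat [' '] (((r - 2).natAbs : Int) * u) ++
        PySem.Chars.join [] ((PySem.List.slice items none (some c)).map (pvCell u)))
      :: pvBuild u (PySem.List.slice items (some c) none) cs (r + 1)

def printing_pattern_py_alt (list_to_print : List String) : String :=
  match PySem.List.max? (list_to_print.map (fun x => PySem.Str.len x)) (fun y => y) with
  | none => ""   -- max of empty generator raises ValueError in B too; excluded by Pre_
  | some unit =>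
    String.ofList (PySem.Chars.join ['\n']
      (pvBuild unit list_to_print [3, 4, 5, 4, (list_to_print.length : Int)] 0))

-- ===== PRECONDITION & SPEC =====
-- Pre_ excludes only the empty list, on which both A and B raise ValueError (max of no elements).
def Pre_printing_pattern_py (list_to_print : List String) : Prop := list_to_print ≠ []
instance (list_to_print : List String) : Decidable (Pre_printing_pattern_py list_to_print) := by
  unfold Pre_printing_pattern_py; infer_instance

def pvWitness_printing_pattern_py : List String := ["ore", "wood", "7"]

def Spec_printing_pattern_py (list_to_print : List String) (out : String) : Prop := out = printing_pattern_py_alt list_to_print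
instance (list_to_print : List String) (out : String) : Decidable (Spec_printing_pattern_py list_to_print out) := by unfold Spec_printing_pattern_py; infer_instance

-- ===== CLAIM (what is proved, stated in full; the proofs are below) =====
def Claim_equal_printing_pattern_py : Prop := ∀ (list_to_print : List String), Dom_printing_pattern_py list_to_print → Pre_printing_pattern_py list_to_print → Spec_printing_pattern_py list_to_print (printing_pattern_py list_to_print)

-- ===== LEMMAS AND PROOFS =====

-- A's piece for one item
def pvPieceA (u : Int) (s : String) : List Char := pvLjust s.toList u ++ pvLjust [] u

-- the pieces contributed by the elements of l whose absolute index (list starts at index i) lies in [lo, hi)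
def pvSeg (unit : Int) (l : List String) (i lo hi : Nat) : List Char :=
  (((l.drop (lo - i)).take (hi - max i lo)).map (pvPieceA unit)).flatten

-- same, for the last bucket [lo, ∞)
def pvSegFrom (unit : Int) (l : List String) (i lo : Nat) : List Char :=
  ((l.drop (lo - i)).map (pvPieceA unit)).flatten

lemma pvSeg_cons_lt {u : Int} {x : String} {t : List String} {i lo hi : Nat} (h : i < lo) :
    pvSeg u (x :: t) i lo hi = pvSeg u t (i+1) lo hi := by
  unfold pvSeg
  have h1 : lo - i = (lo - (i+1)) + 1 := by omega
  have h2 : max i lo = max (i+1) lo := by omega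
  rw [h1, h2, List.drop_succ_cons]

lemma pvSeg_cons_in {u : Int} {x : String} {t : List String} {i lo hi : Nat}
    (h1 : lo ≤ i) (h2 : i < hi) :
    pvSeg u (x :: t) i lo hi = pvPieceA u x ++ pvSeg u t (i+1) lo hi := by
  unfold pvSeg
  have e1 : lo - i = 0 := by omega
  have e2 : lo - (i+1) = 0 := by omega
  have e3 : hi - max i lo = (hi - max (i+1) lo) + 1 := by omega
  rw [e1, e2, e3, List.drop_zero, List.drop_zero, List.take_succ_cons, List.map_cons,
    List.flatten_cons]

lemma pvSeg_cons_ge {u : Int} {x : String} {t : List String} {i lo hi : Nat} (h : hi ≤ i) :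
    pvSeg u (x :: t) i lo hi = pvSeg u t (i+1) lo hi := by
  unfold pvSeg
  have e1 : hi - max i lo = 0 := by omega
  have e2 : hi - max (i+1) lo = 0 := by omega
  rw [e1, e2]
  simp

lemma pvSegFrom_cons_lt {u : Int} {x : String} {t : List String} {i lo : Nat} (h : i < lo) :
    pvSegFrom u (x :: t) i lo = pvSegFrom u t (i+1) lo := by
  unfold pvSegFrom
  have h1 : lo - i = (lo - (i+1)) + 1 := by omega
  rw [h1, List.drop_succ_cons]

lemma pvSegFrom_cons_ge {u : Int} {x : String} {t : List String} {i lo : Nat} (h : lo ≤ i) :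
    pvSegFrom u (x :: t) i lo = pvPieceA u x ++ pvSegFrom u t (i+1) lo := by
  unfold pvSegFrom
  have e1 : lo - i = 0 := by omega
  have e2 : lo - (i+1) = 0 := by omega
  rw [e1, e2, List.drop_zero, List.drop_zero, List.map_cons, List.flatten_cons]

lemma pvEnumerate_cons {α : Type} (x : α) (t : List α) (s : Int) :
    PySem.List.enumerate (x :: t) s = (s, x) :: PySem.List.enumerate t (s+1) := rfl

-- characterization of A's dispatch loop
lemma pvLoopA (u : Int) (l : List String) :
    ∀ (i : Nat) (r0 r1 r2 r3 r4 : List Char),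
    (PySem.List.enumerate l (i : Int)).foldl (pvStepA u) (r0, r1, r2, r3, r4) =
      (r0 ++ pvSeg u l i 0 3, r1 ++ pvSeg u l i 3 7, r2 ++ pvSeg u l i 7 12,
       r3 ++ pvSeg u l i 12 16, r4 ++ pvSegFrom u l i 16) := by
  induction l with
  | nil => intro i r0 r1 r2 r3 r4; simp [PySem.List.enumerate, pvSeg, pvSegFrom]
  | cons x t ih =>
    intro i r0 r1 r2 r3 r4
    rw [pvEnumerate_cons, List.foldl_cons]
    have hcast : ((i : Int) + 1) = ((i + 1 : Nat) : Int) := by push_cast; ring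
    by_cases h3 : i < 3
    · have : pvStepA u (r0, r1, r2, r3, r4) ((i : Int), x) =
          (r0 ++ pvPieceA u x, r1, r2, r3, r4) := by
        simp only [pvStepA, pvPieceA]
        rw [if_pos (by exact_mod_cast h3)]
      rw [this, hcast, ih]
      rw [pvSeg_cons_in (by omega) h3, pvSeg_cons_lt (by omega), pvSeg_cons_lt (by omega),
        pvSeg_cons_lt (by omega), pvSegFrom_cons_lt (by omega), List.append_assoc]
    · by_cases h7 : i < 7
      · have : pvStepA u (r0, r1, r2, r3, r4) ((i : Int), x) =
            (r0, r1 ++ pvPieceA u x, r2, r3, r4) := by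
          simp only [pvStepA, pvPieceA]
          rw [if_neg (by exact_mod_cast h3), if_pos (by exact_mod_cast h7)]
        rw [this, hcast, ih]
        rw [pvSeg_cons_ge (by omega), pvSeg_cons_in (by omega) h7, pvSeg_cons_lt (by omega),
          pvSeg_cons_lt (by omega), pvSegFrom_cons_lt (by omega), List.append_assoc]
      · by_cases h12 : i < 12
        · have : pvStepA u (r0, r1, r2, r3, r4) ((i : Int), x) =
              (r0, r1, r2 ++ pvPieceA u x, r3, r4) := by
            simp only [pvStepA, pvPieceA]
            rw [if_neg (by exact_mod_cast h3), if_neg (by exact_mod_cast h7),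
              if_pos (by exact_mod_cast h12)]
          rw [this, hcast, ih]
          rw [pvSeg_cons_ge (by omega), pvSeg_cons_ge (by omega), pvSeg_cons_in (by omega) h12,
            pvSeg_cons_lt (by omega), pvSegFrom_cons_lt (by omega), List.append_assoc]
        · by_cases h16 : i < 16
          · have : pvStepA u (r0, r1, r2, r3, r4) ((i : Int), x) =
                (r0, r1, r2, r3 ++ pvPieceA u x, r4) := by
              simp only [pvStepA, pvPieceA]
              rw [if_neg (by exact_mod_cast h3), if_neg (by exact_mod_cast h7),
                if_neg (by exact_mod_cast h12), if_pos (by exact_mod_cast h16)]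
            rw [this, hcast, ih]
            rw [pvSeg_cons_ge (by omega), pvSeg_cons_ge (by omega), pvSeg_cons_ge (by omega),
              pvSeg_cons_in (by omega) h16, pvSegFrom_cons_lt (by omega), List.append_assoc]
          · have : pvStepA u (r0, r1, r2, r3, r4) ((i : Int), x) =
                (r0, r1, r2, r3, r4 ++ pvPieceA u x) := by
              simp only [pvStepA, pvPieceA]
              rw [if_neg (by exact_mod_cast h3), if_neg (by exact_mod_cast h7),
                if_neg (by exact_mod_cast h12), if_neg (by exact_mod_cast h16)]
            rw [this, hcast, ih]
            rw [pvSeg_cons_ge (by omega), pvSeg_cons_ge (by omega), pvSeg_cons_ge (by omega),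
              pvSeg_cons_ge (by omega), pvSegFrom_cons_ge (by omega), List.append_assoc]

-- "".join(parts) is flatten
lemma pvJoin_nil_flatten (ps : List (List Char)) : PySem.Chars.join [] ps = ps.flatten := by
  induction ps with
  | nil => simp [PySem.Chars.join_nil]
  | cons a ps ih =>
    cases ps with
    | nil => simp [PySem.Chars.join_singleton]
    | cons b q => rw [PySem.Chars.join_cons_cons, List.flatten_cons, ih]; simp

-- A's two-pad piece equals B's single 2*unit cell when the item is no longer than unit
lemma pvPiece_cell {u : Int} {s : String} (h : (s.toList.length : Int) ≤ u) :
    pvPieceA u s = pvCell u s := by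
  simp only [pvPieceA, pvCell, pvLjust, List.length_nil, Nat.cast_zero, Int.sub_zero,
    List.nil_append, List.append_assoc, ← List.replicate_add]
  have : (u - (s.toList.length : Int)).toNat + u.toNat = (2*u - (s.toList.length : Int)).toNat := by
    omega
  rw [this]

-- the prefixes agree when 0 ≤ unit
lemma pvPrefix2 (u : Int) (hu : 0 ≤ u) :
    PySem.List.pyRepeat (PySem.List.pyRepeat [' '] u) 2 = PySem.List.pyRepeat [' '] (2*u) := by
  rw [PySem.List.pyRepeat_singleton, PySem.List.pyRepeat_singleton]
  have h2 : (2*u).toNat = u.toNat + u.toNat := by omega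
  have h2' : (2:Int).toNat = 2 := rfl
  simp only [PySem.List.pyRepeat, h2', List.replicate_succ, List.replicate_zero,
    List.flatten_cons, List.flatten_nil, List.append_nil]
  rw [h2, List.replicate_add]

-- a chunk's cells equal A's pieces, elementwise, for elements of l
lemma pvMapCell_eq (u : Int) (l sub : List String)
    (hsub : ∀ s ∈ sub, s ∈ l)
    (hmax : ∀ s ∈ l, (s.toList.length : Int) ≤ u) :
    sub.map (pvCell u) = sub.map (pvPieceA u) := by
  refine List.map_congr_left (fun s hs => ?_)
  exact (pvPiece_cell (hmax s (hsub s hs))).symm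

-- ===== VERDICT (by name: the statement is the Claim_ definition above) =====
theorem printing_pattern_py_spec : Claim_equal_printing_pattern_py := by
  intro l _hdom hpre
  unfold Spec_printing_pattern_py printing_pattern_py printing_pattern_py_alt
  cases hmax : PySem.List.max? (l.map (fun x => PySem.Str.len x)) (fun y => y) with
  | none =>
    exfalso
    rw [PySem.List.max?_eq_none_iff] at hmax
    exact hpre (List.map_eq_nil_iff.mp hmax)
  | some u =>
    have hle : ∀ s ∈ l, (s.toList.length : Int) ≤ u := by
      intro s hs
      have := PySem.List.max?_isMax hmax (PySem.Str.len s) (List.mem_map.mpr ⟨s, hs, rfl⟩)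
      simpa [PySem.Str.len] using this
    have hu : 0 ≤ u := by
      cases l with
      | nil => exact absurd rfl hpre
      | cons x t =>
        have := hle x (by simp)
        have : (0:Int) ≤ (x.toList.length : Int) := by positivity
        omega
    simp only
    have hloop := pvLoopA u l 0 (PySem.List.pyRepeat (PySem.List.pyRepeat [' '] u) 2)
      (PySem.List.pyRepeat [' '] u) [] (PySem.List.pyRepeat [' '] u)
      (PySem.List.pyRepeat (PySem.List.pyRepeat [' '] u) 2)
    rw [Nat.cast_zero] at hloop
    rw [hloop]
    -- unfold B's five recursive steps and normalize the slices
    simp only [pvBuild,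
      PySem.List.slice_to l (b := 3) (by norm_num),
      PySem.List.slice_from l (a := 3) (by norm_num)]
    simp only [PySem.List.slice_to (l.drop (3:Int).toNat) (b := 4) (by norm_num),
      PySem.List.slice_from (l.drop (3:Int).toNat) (a := 4) (by norm_num)]
    simp only [PySem.List.slice_to ((l.drop (3:Int).toNat).drop (4:Int).toNat) (b := 5) (by norm_num),
      PySem.List.slice_from ((l.drop (3:Int).toNat).drop (4:Int).toNat) (a := 5) (by norm_num)]
    simp only [PySem.List.slice_to (((l.drop (3:Int).toNat).drop (4:Int).toNat).drop (5:Int).toNat) (b := 4) (by norm_num),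
      PySem.List.slice_from (((l.drop (3:Int).toNat).drop (4:Int).toNat).drop (5:Int).toNat) (a := 4) (by norm_num)]
    have hlen0 : (0:Int) ≤ (l.length : Int) := by positivity
    simp only [PySem.List.slice_to _ (b := (l.length : Int)) hlen0]
    simp only [List.drop_drop]
    have hd : ∀ n : Nat, ∀ s ∈ l.drop n, s ∈ l := fun n s hs => List.mem_of_mem_drop hs
    have ht : ∀ n m : Nat, ∀ s ∈ (l.drop n).take m, s ∈ l :=
      fun n m s hs => List.mem_of_mem_drop (List.mem_of_mem_take hs)
    simp only [pvJoin_nil_flatten, pvPrefix2 u hu, pvSeg, pvSegFrom]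
    have e1 : ∀ (sub : List String), (∀ s ∈ sub, s ∈ l) →
        List.map (pvCell u) sub = List.map (pvPieceA u) sub :=
      fun sub h => pvMapCell_eq u l sub h hle
    rw [e1 (List.take (Int.toNat 3) l) (fun s hs => List.mem_of_mem_take hs),
        e1 _ (ht _ _), e1 _ (ht _ _), e1 _ (ht _ _), e1 _ (ht _ _)]
    norm_num [List.take_of_length_le, List.length_drop, Nat.sub_le]
    norm_num [show Int.toNat 3 = 3 from rfl, show Int.toNat 4 = 4 from rfl,
      show Int.toNat 5 = 5 from rfl]
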